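-- pv_equiv track=rewrite | github.com/Ivan-mech99/Infosearch | spellchecker/utils.py | rip
-- ===== SOURCE A (Python) =====
-- def rip(sent):
--     res = []
--     flag = 0
--     token = ''
--     for letter in sent:
--         if (letter!=' ' and letter!='\t') and flag==0:
--             continue
--         elif (letter==' ' or letter == '\t') and flag ==0:
--             token = ''
--             token+=letter
--             flag =1
--         elif flag==1 and (letter==' ' or letter == '\t'):
--             token+=letter
--         elif flag==1 and (letter!=' ' and letter != '\t'):
--             res.append(token)
--             token=''
--             flag = 0
--     return res
-- ===== SOURCE B (Python) =====
-- def rip(sent):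
--     res = []
--     n = len(sent)
--     i = 0
--     while i < n:
--         if sent[i] == ' ' or sent[i] == '\t':
--             j = i
--             while j < n and (sent[j] == ' ' or sent[j] == '\t'):
--                 j += 1
--             if j < n:
--                 res.append(sent[i:j])
--             i = j
--         else:
--             i += 1
--     return res
-- ===== Notes on version B (the rewrite author's own statement) =====
-- stated objective: alternative
-- what changed: Replaces the char-by-char flag/accumulator state machine with an index scan that locates each maximal space/tab run with an inner while and extracts it in one slice, appending it only when a non-whitespace character follows.
import Mathlib
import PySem

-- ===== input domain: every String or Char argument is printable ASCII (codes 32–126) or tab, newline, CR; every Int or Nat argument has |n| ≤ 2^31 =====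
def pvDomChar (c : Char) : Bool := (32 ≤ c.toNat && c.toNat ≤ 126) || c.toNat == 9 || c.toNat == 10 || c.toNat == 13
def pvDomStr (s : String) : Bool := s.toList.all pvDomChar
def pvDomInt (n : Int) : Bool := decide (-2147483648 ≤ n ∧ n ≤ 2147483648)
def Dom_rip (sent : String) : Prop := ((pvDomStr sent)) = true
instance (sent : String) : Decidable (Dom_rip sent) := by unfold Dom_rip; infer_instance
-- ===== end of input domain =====

-- B replaces A's char-by-char flag/accumulator state machine by an index scan that
-- finds each maximal space/tab run with an inner loop and slices it out whole
-- (objective: alternative decomposition, same O(n) cost).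

-- ===== PORT A =====
-- A's loop: state (res, flag, token), one step per character, Python's elif chain kept in order.
def ripLoop : List Char → List String → Nat → List Char → List String
  | [], res, _, _ => res
  | c :: cs, res, flag, token =>
    if (c ≠ ' ' ∧ c ≠ '\t') ∧ flag = 0 then
      ripLoop cs res flag token
    else if (c = ' ' ∨ c = '\t') ∧ flag = 0 then
      ripLoop cs res 1 [c]                      -- token = '' ; token += letter ; flag = 1
    else if flag = 1 ∧ (c = ' ' ∨ c = '\t') then
      ripLoop cs res flag (token ++ [c])        -- token += letter
    else if flag = 1 ∧ (c ≠ ' ' ∧ c ≠ '\t') then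
      ripLoop cs (res ++ [String.ofList token]) 0 []  -- res.append(token); token=''; flag=0
    else
      ripLoop cs res flag token

def rip (sent : String) : List String := ripLoop sent.toList [] 0 []

-- ===== PORT B =====
def isWS (c : Char) : Bool := c == ' ' || c == '\t'

-- inner while of Source B: 'while j < n and (sent[j] in " \t"): j += 1' (j stays ≤ n; cs[j] is in range whenever read)
def ripInner (cs : List Char) (n j : Nat) : Nat :=
  if j < n ∧ isWS (cs.getD j ' ') then ripInner cs n (j + 1) else j
termination_by n - j

theorem ripInner_ge (cs : List Char) (n : Nat) : ∀ j, j ≤ ripInner cs n j := by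
  intro j
  induction hn : n - j using Nat.strong_induction_on generalizing j with
  | _ m ih =>
    unfold ripInner
    split
    · rename_i h
      have := ih (n - (j + 1)) (by omega) (j + 1) rfl
      omega
    · exact le_refl j

theorem ripInner_step_lt (cs : List Char) (n j : Nat)
    (h1 : j < n) (h2 : isWS (cs.getD j ' ') = true) : j < ripInner cs n j := by
  rw [ripInner]
  simp only [h1, h2, and_self, if_pos, true_and, if_true]
  have := ripInner_ge cs n (j + 1)
  omega

-- outer while of Source B: advance i past each maximal run (slicing ported as drop/take,
-- exact for the 0 ≤ i ≤ j ≤ n that Source B maintains)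
def ripOuter (cs : List Char) (n i : Nat) : List String :=
  if h : i < n then
    if hw : isWS (cs.getD i ' ') then
      let j := ripInner cs n i
      if j < n then String.ofList ((cs.drop i).take (j - i)) :: ripOuter cs n j
      else ripOuter cs n j
    else
      ripOuter cs n (i + 1)
  else []
termination_by n - i
decreasing_by
  · have := ripInner_step_lt cs n i h hw; omega
  · have := ripInner_step_lt cs n i h hw; omega
  · omega

def rip_alt (sent : String) : List String := ripOuter sent.toList sent.toList.length 0

-- ===== PRECONDITION & SPEC =====
def Spec_rip (sent : String) (out : List String) : Prop := out = rip_alt sent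
instance (sent : String) (out : List String) : Decidable (Spec_rip sent out) := by unfold Spec_rip; infer_instance

-- ===== CLAIM (what is proved, stated in full; the proofs are below) =====
def Claim_equal_rip : Prop := ∀ (sent : String), Dom_rip sent → Spec_rip sent (rip sent)

-- ===== LEMMAS AND PROOFS =====

-- A's flag-1 phase: it swallows the remaining whitespace run into token and emits it
-- iff a non-whitespace character follows.
theorem ripLoop_flag1 (cs : List Char) : ∀ res token, ripLoop cs res 1 token =
    if cs.dropWhile isWS = [] then res
    else ripLoop (cs.dropWhile isWS) (res ++ [String.ofList (token ++ cs.takeWhile isWS)]) 0 [] := by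
  induction cs with
  | nil => intro res token; simp [ripLoop]
  | cons c cs ih =>
    intro res token
    by_cases hw : isWS c = true
    · have hc : c = ' ' ∨ c = '\t' := by
        simp [isWS] at hw; rcases hw with h | h <;> [left; right] <;> exact h
      have h1 : ripLoop (c :: cs) res 1 token = ripLoop cs res 1 (token ++ [c]) := by
        rw [ripLoop]
        rcases hc with h | h <;> simp [h]
      rw [h1, ih, List.dropWhile_cons_of_pos hw, List.takeWhile_cons_of_pos hw]
      simp
    · have hc : c ≠ ' ' ∧ c ≠ '\t' := by
        constructor <;> intro h <;> simp [h, isWS] at hw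
      have h1 : ripLoop (c :: cs) res 1 token = ripLoop cs (res ++ [String.ofList token]) 0 [] := by
        rw [ripLoop]
        simp [hc.1, hc.2]
      rw [h1, List.dropWhile_cons_of_neg hw, List.takeWhile_cons_of_neg hw]
      have h2 : ripLoop (c :: cs) (res ++ [String.ofList token]) 0 [] =
          ripLoop cs (res ++ [String.ofList token]) 0 [] := by
        rw [ripLoop]; simp [hc.1, hc.2]
      simp [h2]

theorem ripInner_eq (cs : List Char) : ∀ j, j ≤ cs.length →
    ripInner cs cs.length j = j + ((cs.drop j).takeWhile isWS).length := by
  intro j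
  induction hn : cs.length - j using Nat.strong_induction_on generalizing j with
  | _ m ih =>
    intro hj
    by_cases h : j < cs.length
    · have hdrop : cs.drop j = cs[j] :: cs.drop (j + 1) := List.drop_eq_getElem_cons h
      have hg : cs.getD j ' ' = cs[j] := List.getD_eq_getElem cs ' ' h
      by_cases hw : isWS cs[j] = true
      · rw [ripInner]
        simp only [hg, hw, h, and_self, if_true, true_and, if_pos]
        rw [ih (cs.length - (j + 1)) (by omega) (j + 1) rfl (by omega)]
        rw [hdrop, List.takeWhile_cons_of_pos hw]
        simp; omega
      · rw [ripInner, hdrop, List.takeWhile_cons_of_neg hw]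
        rw [if_neg (by rw [hg]; simp [hw])]
        simp
    · have hj' : j = cs.length := by omega
      rw [ripInner]
      simp [hj', List.drop_length]

theorem drop_takeWhile_len (l : List Char) :
    l.drop (l.takeWhile isWS).length = l.dropWhile isWS := by
  induction l with
  | nil => simp
  | cons c cs ih =>
    by_cases hw : isWS c = true
    · rw [List.takeWhile_cons_of_pos hw, List.dropWhile_cons_of_pos hw]; simpa using ih
    · rw [List.takeWhile_cons_of_neg hw, List.dropWhile_cons_of_neg hw]; simp

theorem takeWhile_len_le (l : List Char) : (l.takeWhile isWS).length ≤ l.length := by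
  induction l with
  | nil => simp
  | cons c cs ih =>
    by_cases hw : isWS c = true
    · rw [List.takeWhile_cons_of_pos hw]; simpa using ih
    · rw [List.takeWhile_cons_of_neg hw]; simp

theorem take_takeWhile_len (l : List Char) :
    l.take (l.takeWhile isWS).length = l.takeWhile isWS := by
  induction l with
  | nil => simp
  | cons c cs ih =>
    by_cases hw : isWS c = true
    · rw [List.takeWhile_cons_of_pos hw]; simp [ih]
    · rw [List.takeWhile_cons_of_neg hw]; simp

-- the crux: A's machine started at position i (flag 0) equals B's scan from i, modulo res
theorem main_lemma (cs : List Char) : ∀ i, i ≤ cs.length → ∀ res token,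
    ripLoop (cs.drop i) res 0 token = res ++ ripOuter cs cs.length i := by
  intro i
  induction hn : cs.length - i using Nat.strong_induction_on generalizing i with
  | _ m ih =>
    intro hi res token
    by_cases h : i < cs.length
    · have hdrop : cs.drop i = cs[i] :: cs.drop (i + 1) := List.drop_eq_getElem_cons h
      have hg : cs.getD i ' ' = cs[i] := List.getD_eq_getElem cs ' ' h
      by_cases hw : isWS cs[i] = true
      · -- whitespace head: A enters flag 1; B scans the run
        have hc : cs[i] = ' ' ∨ cs[i] = '\t' := by
          simp [isWS] at hw; rcases hw with h' | h' <;> [left; right] <;> exact h'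
        have hA1 : ripLoop (cs.drop i) res 0 token = ripLoop (cs.drop (i + 1)) res 1 [cs[i]] := by
          rw [hdrop, ripLoop]
          rcases hc with h' | h' <;> simp [h']
        set t := cs.drop (i + 1) with ht
        have hjval : ripInner cs cs.length i = i + 1 + (t.takeWhile isWS).length := by
          rw [ripInner_eq cs i (by omega)]
          rw [hdrop, List.takeWhile_cons_of_pos hw]
          simp only [List.length_cons]; omega
        have hjle : ripInner cs cs.length i ≤ cs.length := by
          rw [hjval]
          have : (t.takeWhile isWS).length ≤ t.length := takeWhile_len_le t
          have : t.length = cs.length - (i + 1) := by rw [ht]; simp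
          omega
        have hdw : cs.drop (ripInner cs cs.length i) = t.dropWhile isWS := by
          rw [hjval, ← drop_takeWhile_len t, ht, List.drop_drop]
        have htw : (cs.drop i).take (ripInner cs cs.length i - i) =
            cs[i] :: t.takeWhile isWS := by
          rw [hjval, hdrop]
          have : i + 1 + (t.takeWhile isWS).length - i = (t.takeWhile isWS).length + 1 := by omega
          rw [this, List.take_succ_cons, take_takeWhile_len]
        rw [hA1, ripLoop_flag1]
        rw [ripOuter]
        simp only [h, dif_pos, hg, hw, if_pos]
        by_cases hend : ripInner cs cs.length i < cs.length
        · have hne : t.dropWhile isWS ≠ [] := by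
            intro hnil
            rw [← hdw] at hnil
            have := List.length_drop (l := cs) (i := ripInner cs cs.length i)
            rw [hnil] at this
            simp at this
            omega
          simp only [hne, if_neg, hend, if_pos]
          have : ripLoop (t.dropWhile isWS)
              (res ++ [String.ofList ([cs[i]] ++ t.takeWhile isWS)]) 0 [] =
              (res ++ [String.ofList ([cs[i]] ++ t.takeWhile isWS)]) ++
                ripOuter cs cs.length (ripInner cs cs.length i) := by
            rw [← hdw]
            exact ih (cs.length - ripInner cs cs.length i)
              (by have := ripInner_step_lt cs cs.length i h (by rw [hg]; exact hw); omega)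
              _ rfl hjle _ _
          rw [this, htw]
          simp
        · have hjeq : ripInner cs cs.length i = cs.length := by omega
          have hnil : t.dropWhile isWS = [] := by
            rw [← hdw, hjeq, List.drop_length]
          simp only [hnil, if_pos]
          simp only [hend, if_neg]
          rw [ripOuter]
          have : ¬ ripInner cs cs.length i < cs.length := hend
          simp [this]
      · -- non-whitespace head: both skip it
        have hc : cs[i] ≠ ' ' ∧ cs[i] ≠ '\t' := by
          constructor <;> intro h' <;> simp [h', isWS] at hw
        have hA1 : ripLoop (cs.drop i) res 0 token = ripLoop (cs.drop (i + 1)) res 0 token := by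
          rw [hdrop, ripLoop]; simp [hc.1, hc.2]
        rw [hA1, ih (cs.length - (i + 1)) (by omega) (i + 1) rfl (by omega)]
        conv_rhs => rw [ripOuter]
        simp [h, hg, hw]
    · have hi' : i = cs.length := by omega
      rw [hi', List.drop_length, ripLoop, ripOuter]
      simp

-- ===== VERDICT (by name: the statement is the Claim_ definition above) =====
theorem rip_spec : Claim_equal_rip := by
  intro sent _
  unfold Spec_rip rip rip_alt
  have := main_lemma sent.toList 0 (by omega) [] []
  simpa using this
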